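-- pv_equiv track=rewrite | github.com/sipsalabs/ultracompress | scripts/overlay/stream_compress.py | shard_to_layer_map
-- ===== SOURCE A (Python) =====
-- from collections import defaultdict
--
-- def parse_layer_index_from_key(key: str) -> int | None:
--     """`model.layers.27.self_attn.q_proj.weight` -> 27. None for non-layer keys."""
--     # Match `model.layers.{N}.` or `layers.{N}.`
--     parts = key.split(".")
--     for i, p in enumerate(parts):
--         if p == "layers" and i + 1 < len(parts):
--             try:
--                 return int(parts[i + 1])
--             except ValueError:
--                 return None
--     return None
--
-- def shard_to_layer_map(weight_map: dict[str, str]) -> tuple[dict[str, list[int]], dict[int, list[str]]]: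
--     """From a HF safetensors index's weight_map, return:
--         - shard_to_layers: shard_filename -> [layer_idx, ...]
--         - layer_to_shards: layer_idx -> [shard_filename, ...]  (layers can split across shards)
--     """
--     shard_to_layers: dict[str, set[int]] = defaultdict(set)
--     layer_to_shards: dict[int, set[str]] = defaultdict(set)
--     for key, shard in weight_map.items():
--         layer_idx = parse_layer_index_from_key(key)
--         if layer_idx is None:
--             continue
--         shard_to_layers[shard].add(layer_idx)
--         layer_to_shards[layer_idx].add(shard)
--     return (
--         {s: sorted(layers) for s, layers in shard_to_layers.items()},
--         {l: sorted(shards) for l, shards in layer_to_shards.items()},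
--     )
-- ===== SOURCE B (Python) =====
-- def parse_layer_index_from_key(key: str) -> int | None:
--     """`model.layers.27.self_attn.q_proj.weight` -> 27. None for non-layer keys."""
--     # Match `model.layers.{N}.` or `layers.{N}.`
--     parts = key.split(".")
--     for i, p in enumerate(parts):
--         if p == "layers" and i + 1 < len(parts):
--             try:
--                 return int(parts[i + 1])
--             except ValueError:
--                 return None
--     return None
--
-- def shard_to_layer_map(weight_map):
--     # One parse pass producing a flat (shard, layer) pair list, then two
--     # independent group-by passes over that list.
--     pairs = [(shard, idx) for key, shard in weight_map.items()
--              if (idx := parse_layer_index_from_key(key)) is not None]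
--     shard_order = list(dict.fromkeys(s for s, _ in pairs))
--     layer_order = list(dict.fromkeys(l for _, l in pairs))
--     shard_to_layers = {s: sorted({l for sh, l in pairs if sh == s}) for s in shard_order}
--     layer_to_shards = {l: sorted({sh for sh, l2 in pairs if l2 == l}) for l in layer_order}
--     return shard_to_layers, layer_to_shards
-- ===== Notes on version B (the rewrite author's own statement) =====
-- stated objective: alternative
-- what changed: A fills two defaultdict(set)s incrementally inside one loop over weight_map; B makes one parse pass producing a flat (shard, layer) pair list and then builds each of the two maps by a separate group-by pass over that list (first-occurrence key order via dict.fromkeys, sorted set comprehensions for the values).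
import Mathlib
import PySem

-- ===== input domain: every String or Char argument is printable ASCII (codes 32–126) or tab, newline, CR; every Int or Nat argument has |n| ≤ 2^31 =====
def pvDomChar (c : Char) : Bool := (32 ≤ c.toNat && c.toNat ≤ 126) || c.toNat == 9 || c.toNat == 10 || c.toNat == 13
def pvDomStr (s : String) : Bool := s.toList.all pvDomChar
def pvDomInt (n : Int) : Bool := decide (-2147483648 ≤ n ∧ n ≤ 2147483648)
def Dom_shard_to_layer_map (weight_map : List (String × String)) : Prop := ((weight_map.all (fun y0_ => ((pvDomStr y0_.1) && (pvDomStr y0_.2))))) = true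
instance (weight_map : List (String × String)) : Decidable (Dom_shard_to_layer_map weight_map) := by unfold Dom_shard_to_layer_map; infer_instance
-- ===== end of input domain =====

-- B replaces A's single loop filling two defaultdict(set)s by one parse pass producing a flat
-- (shard, layer) pair list followed by two independent group-by passes over that list (alternative
-- decomposition, same behaviour).


-- ===== PORT A =====
-- shared helper: parse_layer_index_from_key (byte-identical in Source A and Source B)
def parse_layer_index_go : List String → Option Int
  | p :: q :: rest =>
      if p = "layers" then
        -- `i + 1 < len(parts)` holds exactly when a successor element q exists
        match PySem.Int.ofStr? q with
        | some n => some n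
        | none => none
      else parse_layer_index_go (q :: rest)
  | _ => none

def parse_layer_index_from_key (key : String) : Option Int :=
  -- key.split("."): separator "." is nonempty, so split? is always `some`
  parse_layer_index_go ((PySem.Str.split? key ".").getD [])

def shard_to_layer_map (weight_map : List (String × String)) : (List (String × List Int)) × (List (String × List String)) :=
  let st := weight_map.foldl
    (fun st kv =>
      match parse_layer_index_from_key kv.1 with
      | none => st
      | some li =>
          (st.1.modify kv.2 PySem.Set.empty (fun s => PySem.Set.add s li),
           st.2.modify li PySem.Set.empty (fun s => PySem.Set.add s kv.2)))
    ((PySem.Dict.empty : PySem.Dict String (PySem.Set Int)),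
     (PySem.Dict.empty : PySem.Dict Int (PySem.Set String)))
  (st.1.items.map (fun p => (p.1, PySem.List.sorted p.2 (fun x => x) false)),
   -- Python's second dict has int keys; rendered as String per the fixed type convention
   st.2.items.map (fun p => (PySem.Int.toStr p.1, PySem.List.sorted p.2 (fun x => x) false)))

-- ===== PORT B =====
def shard_to_layer_map_alt (weight_map : List (String × String)) : (List (String × List Int)) × (List (String × List String)) :=
  let pairs : List (String × Int) := weight_map.filterMap
    (fun kv =>
      match parse_layer_index_from_key kv.1 with
      | some idx => some (kv.2, idx)
      | none => none)
  let shard_order := PySem.List.dedup (pairs.map (·.1))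
  let layer_order := PySem.List.dedup (pairs.map (·.2))
  (shard_order.map (fun s =>
      (s, PySem.List.sorted (PySem.Set.ofList ((pairs.filter (fun p => p.1 == s)).map (·.2))) (fun x => x) false)),
   layer_order.map (fun l =>
      (PySem.Int.toStr l, PySem.List.sorted (PySem.Set.ofList ((pairs.filter (fun p => p.2 == l)).map (·.1))) (fun x => x) false)))

-- ===== PRECONDITION & SPEC =====
def Spec_shard_to_layer_map (weight_map : List (String × String)) (out : (List (String × List Int)) × (List (String × List String))) : Prop := out = shard_to_layer_map_alt weight_map
instance (weight_map : List (String × String)) (out : (List (String × List Int)) × (List (String × List String))) : Decidable (Spec_shard_to_layer_map weight_map out) := by unfold Spec_shard_to_layer_map; infer_instance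

-- ===== CLAIM (what is proved, stated in full; the proofs are below) =====
def Claim_equal_shard_to_layer_map : Prop := ∀ (weight_map : List (String × String)), Dom_shard_to_layer_map weight_map → Spec_shard_to_layer_map weight_map (shard_to_layer_map weight_map)

-- ===== LEMMAS AND PROOFS =====

-- defaultdict(set) accumulation: the value stored under c is the set of values whose key is c.
theorem getD_foldl_modify_setadd {α β γ : Type} [DecidableEq α] [BEq α] [LawfulBEq α] [BEq β]
    (k : γ → α) (v : γ → β) (l : List γ) (d : PySem.Dict α (PySem.Set β)) (c : α) :
    (l.foldl (fun d p => d.modify (k p) PySem.Set.empty (fun s => PySem.Set.add s (v p))) d).getD c PySem.Set.empty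
      = PySem.Set.update (d.getD c PySem.Set.empty) ((l.filter (fun p => k p == c)).map v) := by
  induction l generalizing d with
  | nil => simp [PySem.Set.update]
  | cons p ps ih =>
      simp only [List.foldl_cons, List.filter_cons]
      rw [ih]
      by_cases h : k p = c
      · subst h
        rw [PySem.Dict.getD_modify_self]
        simp [PySem.Set.update_cons]
      · have hb : (k p == c) = false := by simp [h]
        rw [PySem.Dict.getD_modify, if_neg (fun hc => h hc.symm)]
        simp [hb]

-- A's one loop over weight_map, skipping non-layer keys, is the fold of its per-pair updates
-- over B's parsed pair list.
theorem foldA_eq (wm : List (String × String))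
    (init : PySem.Dict String (PySem.Set Int) × PySem.Dict Int (PySem.Set String)) :
    wm.foldl
      (fun st kv =>
        match parse_layer_index_from_key kv.1 with
        | none => st
        | some li =>
            (st.1.modify kv.2 PySem.Set.empty (fun s => PySem.Set.add s li),
             st.2.modify li PySem.Set.empty (fun s => PySem.Set.add s kv.2))) init
      = (wm.filterMap (fun kv =>
          match parse_layer_index_from_key kv.1 with
          | some idx => some (kv.2, idx)
          | none => none)).foldl
        (fun st p =>
          (st.1.modify p.1 PySem.Set.empty (fun s => PySem.Set.add s p.2),
           st.2.modify p.2 PySem.Set.empty (fun s => PySem.Set.add s p.1))) init := by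
  induction wm generalizing init with
  | nil => rfl
  | cons kv rest ih =>
      simp only [List.foldl_cons, List.filterMap_cons]
      cases parse_layer_index_from_key kv.1 <;> exact ih _

theorem shard_to_layer_map_spec : Claim_equal_shard_to_layer_map := by
  intro wm _
  unfold Spec_shard_to_layer_map shard_to_layer_map shard_to_layer_map_alt
  dsimp only
  rw [foldA_eq]
  rw [PySem.List.foldl_prod_mk
    (f := fun (d : PySem.Dict String (PySem.Set Int)) (p : String × Int) =>
      d.modify p.1 PySem.Set.empty (fun s => PySem.Set.add s p.2))
    (g := fun (d : PySem.Dict Int (PySem.Set String)) (p : String × Int) =>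
      d.modify p.2 PySem.Set.empty (fun s => PySem.Set.add s p.1))]
  set pairs := wm.filterMap (fun kv =>
      match parse_layer_index_from_key kv.1 with
      | some idx => some (kv.2, idx)
      | none => none)
  have hnd1 : (pairs.foldl (fun d p => d.modify p.1 PySem.Set.empty
      (fun s => PySem.Set.add s p.2)) PySem.Dict.empty).keys.Nodup :=
    PySem.Dict.nodup_keys_foldl_modify_key pairs (fun p => p.1) PySem.Set.empty
      (fun _ p s => PySem.Set.add s p.2) PySem.Dict.empty PySem.Dict.nodup_keys_empty
  have hnd2 : (pairs.foldl (fun d p => d.modify p.2 PySem.Set.empty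
      (fun s => PySem.Set.add s p.1)) PySem.Dict.empty).keys.Nodup :=
    PySem.Dict.nodup_keys_foldl_modify_key pairs (fun p => p.2) PySem.Set.empty
      (fun _ p s => PySem.Set.add s p.1) PySem.Dict.empty PySem.Dict.nodup_keys_empty
  have hk1 : (pairs.foldl (fun d p => d.modify p.1 PySem.Set.empty
      (fun s => PySem.Set.add s p.2)) PySem.Dict.empty).keys
      = PySem.Set.ofList (pairs.map (fun p => p.1)) := by
    have := PySem.Dict.keys_foldl_modify_key pairs (fun p => p.1) PySem.Set.empty
      (fun _ p s => PySem.Set.add s p.2) PySem.Dict.empty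
    simpa [PySem.Dict.keys_empty, PySem.Set.update_nil_left] using this
  have hk2 : (pairs.foldl (fun d p => d.modify p.2 PySem.Set.empty
      (fun s => PySem.Set.add s p.1)) PySem.Dict.empty).keys
      = PySem.Set.ofList (pairs.map (fun p => p.2)) := by
    have := PySem.Dict.keys_foldl_modify_key pairs (fun p => p.2) PySem.Set.empty
      (fun _ p s => PySem.Set.add s p.1) PySem.Dict.empty
    simpa [PySem.Dict.keys_empty, PySem.Set.update_nil_left] using this
  rw [PySem.Dict.items_eq_map_keys _ hnd1 PySem.Set.empty,
      PySem.Dict.items_eq_map_keys _ hnd2 PySem.Set.empty, hk1, hk2]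
  simp only [getD_foldl_modify_setadd (fun p : String × Int => p.1) (fun p => p.2) pairs,
    getD_foldl_modify_setadd (fun p : String × Int => p.2) (fun p => p.1) pairs,
    PySem.Dict.getD_empty, PySem.List.dedup_eq_ofList, List.map_map]
  simp only [PySem.Set.empty, PySem.Set.update_nil_left]
  rfl
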